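-- pv_equiv track=rewrite | github.com/christoph-weiser/spatk | spatk/helpers.py | remove_enclosed_space
-- ===== SOURCE A (Python) =====
-- def remove_enclosed_space(string):
--     """ Remove whitespace enclosed in single quotes.
--
--     Required inputs:
--     ----------------
--     string (str):   A string from which the whitespace
--                     is to be removed.
--
--
--     Returns
--     ----------------
--     string (str):   String with whitespace between
--                     single quotes removed.
--     """
--     state = False
--     parsed = []
--     for c in string:
--         if c == "'":
--             if state:
--                 state = False
--             else:
--                 state = True
--             parsed.append(c)
--         else:
--             if state:
--                 if c == " ":
--                     pass
--                 else:
--                     parsed.append(c)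
--             else:
--                 parsed.append(c)
--     return "".join(parsed)
-- ===== SOURCE B (Python) =====
-- def remove_enclosed_space(string):
--     parts = string.split("'")
--     return "'".join(p.replace(" ", "") if i % 2 == 1 else p
--                     for i, p in enumerate(parts))
-- ===== Notes on version B (the rewrite author's own statement) =====
-- stated objective: faster
-- what changed: Replaces the char-by-char boolean state machine with split on the quote character, stripping spaces from odd-index segments via str.replace, and rejoining.
import Mathlib
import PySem

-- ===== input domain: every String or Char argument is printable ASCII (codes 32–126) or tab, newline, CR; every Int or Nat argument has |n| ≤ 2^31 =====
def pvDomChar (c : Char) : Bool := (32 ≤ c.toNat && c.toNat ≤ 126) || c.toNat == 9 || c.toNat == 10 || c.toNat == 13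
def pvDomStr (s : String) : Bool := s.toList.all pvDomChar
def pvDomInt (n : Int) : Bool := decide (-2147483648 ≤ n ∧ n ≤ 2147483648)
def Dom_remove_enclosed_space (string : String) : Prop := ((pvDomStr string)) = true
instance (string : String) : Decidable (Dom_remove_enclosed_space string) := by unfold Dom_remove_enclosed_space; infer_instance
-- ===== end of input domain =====

-- B rewrites A's char-by-char quote-state machine as split-on-quote / strip spaces in odd segments / rejoin (idiomatic; same O(n) cost).

-- ===== PORT A =====
-- state machine: fold over the characters carrying (state, parsed)
def remove_enclosed_space (string : String) : String :=
  let r := string.toList.foldl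
    (fun (acc : Bool × List Char) c =>
      if c = '\'' then
        (if acc.1 then (false, acc.2 ++ [c]) else (true, acc.2 ++ [c]))
      else
        if acc.1 then
          (if c = ' ' then acc else (acc.1, acc.2 ++ [c]))
        else (acc.1, acc.2 ++ [c]))
    (false, [])
  String.ofList r.2

-- ===== PORT B =====
-- parts = string.split("'"); strip " " from odd-index parts; "'".join
def remove_enclosed_space_alt (string : String) : String :=
  let parts := PySem.Chars.splitOn string.toList ['\'']
  String.ofList (PySem.Chars.join ['\'']
    ((PySem.List.enumerate parts).map
      (fun p => if PySem.Int.mod p.1 2 = 1 then PySem.Chars.replace p.2 [' '] [] else p.2)))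

-- ===== PRECONDITION & SPEC =====
def Spec_remove_enclosed_space (string : String) (out : String) : Prop := out = remove_enclosed_space_alt string
instance (string : String) (out : String) : Decidable (Spec_remove_enclosed_space string out) := by unfold Spec_remove_enclosed_space; infer_instance

-- ===== CLAIM (what is proved, stated in full; the proofs are below) =====
def Claim_equal_remove_enclosed_space : Prop := ∀ (string : String), Dom_remove_enclosed_space string → Spec_remove_enclosed_space string (remove_enclosed_space string)

-- ===== LEMMAS AND PROOFS =====

-- simple structural splitter on the quote character (proof-side spec of Chars.splitOn)
def pvSp : List Char → List (List Char)
  | [] => [[]]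
  | c :: cs =>
    if c = '\'' then [] :: pvSp cs
    else match pvSp cs with
      | [] => [[c]]
      | h :: t => (c :: h) :: t

lemma pvSp_ne_nil (cs : List Char) : pvSp cs ≠ [] := by
  cases cs with
  | nil => simp [pvSp]
  | cons c cs =>
    simp only [pvSp]
    split
    · simp
    · split <;> simp_all

-- Chars.splitOn on a single quote equals the simple splitter
lemma splitOn_go_quote (l : List Char) : ∀ (fuel : Nat) (cur : List Char) (acc : List (List Char)),
    l.length ≤ fuel →
    PySem.Chars.splitOn.go ['\''] fuel l cur acc =
      acc.reverse ++ (match pvSp l with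
        | [] => [cur.reverse]
        | h :: t => (cur.reverse ++ h) :: t) := by
  induction l with
  | nil =>
    intro fuel cur acc _
    cases fuel <;> simp [PySem.Chars.splitOn.go, pvSp]
  | cons c rest ih =>
    intro fuel cur acc hf
    cases fuel with
    | zero => simp at hf
    | succ f =>
      simp only [List.length_cons, Nat.succ_le_succ_iff] at hf
      by_cases hc : c = '\''
      · subst hc
        rw [show PySem.Chars.splitOn.go ['\''] (f+1) ('\'' :: rest) cur acc =
            PySem.Chars.splitOn.go ['\''] f rest [] (cur.reverse :: acc) from by
          simp [PySem.Chars.splitOn.go, List.isPrefixOf]]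
        rw [ih f [] (cur.reverse :: acc) hf]
        have := pvSp_ne_nil rest
        cases hsp : pvSp rest with
        | nil => exact absurd hsp this
        | cons h t => simp [pvSp, hsp]
      · rw [show PySem.Chars.splitOn.go ['\''] (f+1) (c :: rest) cur acc =
            PySem.Chars.splitOn.go ['\''] f rest (c :: cur) acc from by
          have : (['\''].isPrefixOf (c :: rest)) = false := by
            simp [List.isPrefixOf]
            exact fun h => hc h.symm
          simp [PySem.Chars.splitOn.go, this]]
        rw [ih f (c :: cur) acc hf]
        have := pvSp_ne_nil rest
        cases hsp : pvSp rest with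
        | nil => exact absurd hsp this
        | cons h t => simp [pvSp, hsp, hc]

lemma splitOn_quote (cs : List Char) : PySem.Chars.splitOn cs ['\''] = pvSp cs := by
  unfold PySem.Chars.splitOn
  rw [splitOn_go_quote cs (cs.length + 1) [] [] (by omega)]
  have := pvSp_ne_nil cs
  cases hsp : pvSp cs with
  | nil => exact absurd hsp this
  | cons h t => simp

-- Chars.replace with old = [' '], new = [] is a filter
lemma replace_go_space (l : List Char) : ∀ (fuel : Nat) (acc : List Char),
    l.length ≤ fuel →
    PySem.Chars.replace.go [' '] [] fuel l acc = acc.reverse ++ l.filter (fun c => c != ' ') := by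
  induction l with
  | nil => intro fuel acc _; cases fuel <;> simp [PySem.Chars.replace.go]
  | cons c rest ih =>
    intro fuel acc hf
    cases fuel with
    | zero => simp at hf
    | succ f =>
      simp only [List.length_cons, Nat.succ_le_succ_iff] at hf
      by_cases hc : c = ' '
      · subst hc
        rw [show PySem.Chars.replace.go [' '] [] (f+1) (' ' :: rest) acc =
            PySem.Chars.replace.go [' '] [] f rest acc from by
          simp [PySem.Chars.replace.go, List.isPrefixOf]]
        rw [ih f acc hf]; simp
      · rw [show PySem.Chars.replace.go [' '] [] (f+1) (c :: rest) acc =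
            PySem.Chars.replace.go [' '] [] f rest (c :: acc) from by
          have : ([' '].isPrefixOf (c :: rest)) = false := by
            simp [List.isPrefixOf]
            exact fun h => hc h.symm
          simp [PySem.Chars.replace.go, this]]
        rw [ih f (c :: acc) hf]; simp [hc]

lemma replace_space (cs : List Char) :
    PySem.Chars.replace cs [' '] [] = cs.filter (fun c => c != ' ') := by
  unfold PySem.Chars.replace
  simp only [List.isEmpty_cons]
  exact replace_go_space cs cs.length [] (le_refl _)

-- the quote-state machine written structurally
def pvG : List Char → Bool → List Char
  | [], _ => []
  | c :: cs, s =>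
    if c = '\'' then c :: pvG cs (!s)
    else if s && (c = ' ') then pvG cs s
    else c :: pvG cs s

-- join with alternating filtering, starting with parity s
def pvAltJoin : Bool → List (List Char) → List Char
  | _, [] => []
  | s, [h] => if s then h.filter (fun c => c != ' ') else h
  | s, h :: h2 :: t =>
    (if s then h.filter (fun c => c != ' ') else h) ++ '\'' :: pvAltJoin (!s) (h2 :: t)

-- A's fold accumulates pvG
lemma foldA (cs : List Char) : ∀ (s : Bool) (p : List Char),
    cs.foldl
      (fun (acc : Bool × List Char) c =>
        if c = '\'' then
          (if acc.1 then (false, acc.2 ++ [c]) else (true, acc.2 ++ [c]))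
        else
          if acc.1 then
            (if c = ' ' then acc else (acc.1, acc.2 ++ [c]))
          else (acc.1, acc.2 ++ [c]))
      (s, p) = ((cs.foldl (fun b c => if c = '\'' then !b else b) s), p ++ pvG cs s) := by
  induction cs with
  | nil => intro s p; simp [pvG]
  | cons c rest ih =>
    intro s p
    simp only [List.foldl_cons]
    by_cases hc : c = '\''
    · subst hc
      cases s <;> simp [ih, pvG]
    · cases s with
      | false => simp [hc, ih, pvG]
      | true =>
        by_cases hsp : c = ' '
        · subst hsp; simp [hc, ih, pvG]
        · simp [hc, hsp, ih, pvG]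

-- the state machine equals alternating filtering of the splitter output
lemma pvG_eq_altJoin (cs : List Char) : ∀ (s : Bool), pvG cs s = pvAltJoin s (pvSp cs) := by
  induction cs with
  | nil => intro s; cases s <;> simp [pvG, pvSp, pvAltJoin]
  | cons c rest ih =>
    intro s
    by_cases hc : c = '\''
    · subst hc
      have := pvSp_ne_nil rest
      cases hsp : pvSp rest with
      | nil => exact absurd hsp this
      | cons h t =>
        simp only [pvG, pvSp, hsp]
        cases s <;> simp [pvAltJoin, ih, hsp]
    · have := pvSp_ne_nil rest
      cases hsp : pvSp rest with
      | nil => exact absurd hsp this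
      | cons h t =>
        simp only [pvG, pvSp, if_neg hc, hsp]
        cases t with
        | nil =>
          cases s with
          | false => simp [pvAltJoin, ih, hsp]
          | true =>
            by_cases hsp2 : c = ' '
            · subst hsp2; simp [pvAltJoin, ih, hsp]
            · simp [pvAltJoin, hsp2, ih, hsp]
        | cons h2 t2 =>
          cases s with
          | false => simp [pvAltJoin, ih, hsp]
          | true =>
            by_cases hsp2 : c = ' '
            · subst hsp2; simp [pvAltJoin, ih, hsp]
            · simp [pvAltJoin, hsp2, ih, hsp]

-- join with a single quote on a nonempty tail peels off the head
lemma join_quote_cons (x : List Char) (ps : List (List Char)) (hps : ps ≠ []) :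
    PySem.Chars.join ['\''] (x :: ps) = x ++ '\'' :: PySem.Chars.join ['\''] ps := by
  cases ps with
  | nil => exact absurd rfl hps
  | cons y ys => simp [PySem.Chars.join, List.intercalate, List.intersperse]

-- B's enumerate/map/join over any parts list equals pvAltJoin at the start parity
lemma joinEnum (parts : List (List Char)) : ∀ (k : Nat),
    PySem.Chars.join ['\'']
      ((PySem.List.enumerate parts (k : Int)).map
        (fun p => if PySem.Int.mod p.1 2 = 1 then PySem.Chars.replace p.2 [' '] [] else p.2)) =
      pvAltJoin (k % 2 = 1) parts := by
  induction parts with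
  | nil => intro k; simp [PySem.List.enumerate, PySem.Chars.join, List.intercalate, pvAltJoin]
  | cons h t ih =>
    intro k
    have hmod : PySem.Int.mod (k : Int) 2 = ((k % 2 : Nat) : Int) := PySem.Int.mod_natCast k 2
    have hk1 : ((k : Int) + 1) = ((k + 1 : Nat) : Int) := by push_cast; ring
    cases t with
    | nil =>
      rw [show PySem.List.enumerate [h] (k : Int) = [((k : Int), h)] from rfl]
      rw [List.map_cons, List.map_nil]
      rw [show PySem.Chars.join ['\''] [if PySem.Int.mod ((k : Int), h).1 2 = 1 then
            PySem.Chars.replace ((k : Int), h).2 [' '] [] else ((k : Int), h).2] =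
          (if PySem.Int.mod (k : Int) 2 = 1 then PySem.Chars.replace h [' '] [] else h) from by
        simp [PySem.Chars.join, List.intercalate, List.intersperse]]
      by_cases hp : k % 2 = 1
      · rw [if_pos (by rw [hmod, hp]; rfl)]
        simp [pvAltJoin, hp, replace_space]
      · rw [if_neg (by rw [hmod]; exact_mod_cast hp)]
        simp [pvAltJoin, hp]
    | cons h2 t2 =>
      have ihk := ih (k + 1)
      rw [show PySem.List.enumerate (h :: h2 :: t2) (k : Int) =
          ((k : Int), h) :: PySem.List.enumerate (h2 :: t2) ((k : Int) + 1) from rfl]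
      rw [List.map_cons, hk1]
      rw [join_quote_cons _ _ (by simp [PySem.List.enumerate])]
      rw [ihk]
      by_cases hp : k % 2 = 1
      · have hp2 : ¬ ((k + 1) % 2 = 1) := by omega
        rw [if_pos (by rw [hmod, hp]; rfl)]
        simp [pvAltJoin, hp, hp2, replace_space]
      · have hp2 : (k + 1) % 2 = 1 := by omega
        rw [if_neg (by rw [hmod]; exact_mod_cast hp)]
        simp [pvAltJoin, hp, hp2]

-- ===== VERDICT (by name: the statement is the Claim_ definition above) =====
theorem remove_enclosed_space_spec : Claim_equal_remove_enclosed_space := by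
  intro s _
  show remove_enclosed_space s = remove_enclosed_space_alt s
  simp only [remove_enclosed_space, remove_enclosed_space_alt]
  rw [splitOn_quote]
  have hB := joinEnum (pvSp s.toList) 0
  simp only [Nat.cast_zero] at hB
  rw [hB]
  rw [foldA s.toList false []]
  simp only [List.nil_append]
  rw [pvG_eq_altJoin]
  norm_num
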